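-- pv_equiv track=rewrite | github.com/keiraleal/tartan-hacks-updated | from_clusters/overlap.py | min_scores
-- ===== SOURCE A (Python) =====
-- def min_scores(scores):
--     success_dist = []
--     failure_dist = []
--
--     for row in scores:
--         failure_dist.append(min(row))
--
--     for j in range(len(scores[0])):
--         success_dist.append(min(scores[i][j] for i in range(len(scores))))
--
--     return {
--         "success_dist": success_dist,
--         "failure_dist": failure_dist
--         }
-- ===== SOURCE B (Python) =====
-- def min_scores(scores):
--     col_mins = list(scores[0])
--     failure_dist = []
--     for row in scores:
--         failure_dist.append(min(row))
--         col_mins = [min(c, x) for c, x in zip(col_mins, row)]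
--     return {
--         "success_dist": col_mins,
--         "failure_dist": failure_dist
--         }
-- ===== Notes on version B (the rewrite author's own statement) =====
-- stated objective: alternative
-- what changed: Replaces the second nested loop (which re-scans all rows for every column index) by a single row-major pass that folds each row into a running column-minimum vector with zip.
import Mathlib
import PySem

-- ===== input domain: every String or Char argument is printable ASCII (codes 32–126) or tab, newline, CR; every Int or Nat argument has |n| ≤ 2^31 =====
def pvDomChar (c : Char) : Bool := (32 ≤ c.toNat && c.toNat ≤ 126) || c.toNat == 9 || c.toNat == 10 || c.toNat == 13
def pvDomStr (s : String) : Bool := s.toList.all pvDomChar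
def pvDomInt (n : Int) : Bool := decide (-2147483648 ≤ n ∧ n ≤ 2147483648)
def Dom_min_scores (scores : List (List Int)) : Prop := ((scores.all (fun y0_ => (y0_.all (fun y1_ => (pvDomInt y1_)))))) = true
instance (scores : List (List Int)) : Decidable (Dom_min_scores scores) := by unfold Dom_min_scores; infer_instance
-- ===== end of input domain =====

-- B replaces A's column-major re-scan by one row-major pass folding a running column-min vector with zip (return value only; no mutation).

-- ===== PORT A =====
-- min(row) → PySem.List.min?; scores[0] and scores[i][j] → pyGet?/pyGetD (none/default = IndexError, excluded by Pre_).
def min_scores (scores : List (List Int)) : List (String × List Int) :=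
  let failure_dist := scores.foldl (fun acc row => acc ++ [(PySem.List.min? row (fun x => x)).getD 0]) []
  let first := (PySem.List.pyGet? scores 0).getD []
  let success_dist := (PySem.List.pyRange 0 (first.length : Int) 1).foldl
    (fun acc j => acc ++ [(PySem.List.min?
        ((PySem.List.pyRange 0 (scores.length : Int) 1).map
          (fun i => PySem.List.pyGetD (PySem.List.pyGetD scores i []) j 0))
        (fun x => x)).getD 0]) []
  [("success_dist", success_dist), ("failure_dist", failure_dist)]

-- ===== PORT B =====
-- list(scores[0]) seeds col_mins; each row updates it via zip+min (List.zipWith min) and appends min(row) to failure_dist.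
def min_scores_alt (scores : List (List Int)) : List (String × List Int) :=
  let st := scores.foldl (fun (st : List Int × List Int) row =>
      (List.zipWith min st.1 row, st.2 ++ [(PySem.List.min? row (fun x => x)).getD 0]))
    ((PySem.List.pyGet? scores 0).getD [], [])
  [("success_dist", st.1), ("failure_dist", st.2)]

-- ===== PRECONDITION & SPEC =====
-- Pre_ excludes exactly the inputs where A raises: empty scores (IndexError on scores[0]),
-- an empty row (ValueError from min([])), or a row shorter than row 0 (IndexError in the column loop).
def Pre_min_scores (scores : List (List Int)) : Prop :=
  scores ≠ [] ∧ ∀ row ∈ scores, row ≠ [] ∧ (scores.headD []).length ≤ row.length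
instance (scores : List (List Int)) : Decidable (Pre_min_scores scores) := by unfold Pre_min_scores; infer_instance
def pvWitness_min_scores : List (List Int) := [[3, 1, 4], [1, 5, 9], [2, 6, 5]]

def Spec_min_scores (scores : List (List Int)) (out : List (String × List Int)) : Prop := out = min_scores_alt scores
instance (scores : List (List Int)) (out : List (String × List Int)) : Decidable (Spec_min_scores scores out) := by unfold Spec_min_scores; infer_instance

-- ===== CLAIM (what is proved, stated in full; the proofs are below) =====
def Claim_equal_min_scores : Prop := ∀ (scores : List (List Int)), Dom_min_scores scores → Pre_min_scores scores → Spec_min_scores scores (min_scores scores)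

-- ===== LEMMAS AND PROOFS =====

-- appending singletons in a foldl is just map
theorem foldl_append_singleton {α β : Type} (xs : List α) (f : α → β) (acc : List β) :
    xs.foldl (fun a x => a ++ [f x]) acc = acc ++ xs.map f := by
  induction xs generalizing acc with
  | nil => simp
  | cons x t ih => simp [List.foldl_cons, ih]

-- the pair-state fold of B splits into its two independent components
theorem foldl_pair_split (xs : List (List Int)) (c : List Int) (a : List Int) :
    xs.foldl (fun (st : List Int × List Int) row =>
        (List.zipWith min st.1 row, st.2 ++ [(PySem.List.min? row (fun x => x)).getD 0])) (c, a)
      = (xs.foldl (fun c row => List.zipWith min c row) c,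
         a ++ xs.map (fun row => (PySem.List.min? row (fun x => x)).getD 0)) := by
  induction xs generalizing c a with
  | nil => simp
  | cons x t ih => simp [List.foldl_cons, ih]

theorem range_map_getD (cm : List Int) :
    (List.range cm.length).map (fun k => cm.getD k 0) = cm := by
  apply List.ext_getElem
  · simp
  · intro i h1 h2
    have hi : i < cm.length := by simpa using h1
    rw [List.getElem_map, List.getElem_range, List.getD_eq_getElem _ _ hi]

-- pointwise characterisation of the running column-min fold
theorem foldl_zipWith_min (rows : List (List Int)) (cm : List Int)
    (h : ∀ r ∈ rows, cm.length ≤ r.length) :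
    rows.foldl (fun c r => List.zipWith min c r) cm
      = (List.range cm.length).map (fun k => (rows.map (fun r => r.getD k 0)).foldl min (cm.getD k 0)) := by
  induction rows generalizing cm with
  | nil =>
    rw [List.foldl_nil]
    simp only [List.map_nil, List.foldl_nil]
    exact (range_map_getD cm).symm
  | cons r t ih =>
    have hr : cm.length ≤ r.length := h r (by simp)
    have hlen : (List.zipWith min cm r).length = cm.length := by
      simp [List.length_zipWith, Nat.min_eq_left hr]
    have ht : ∀ r' ∈ t, (List.zipWith min cm r).length ≤ r'.length := by
      intro r' hr'; rw [hlen]; exact h r' (by simp [hr'])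
    rw [List.foldl_cons, ih _ ht, hlen]
    apply List.map_congr_left
    intro k hk
    have hk' : k < cm.length := List.mem_range.mp hk
    have hzd : (List.zipWith min cm r).getD k 0 = min (cm.getD k 0) (r.getD k 0) := by
      have hkz : k < (List.zipWith min cm r).length := by omega
      rw [List.getD_eq_getElem _ _ hkz, List.getElem_zipWith,
          List.getD_eq_getElem _ _ hk', List.getD_eq_getElem _ _ (by omega)]
    rw [List.map_cons, List.foldl_cons, hzd]

theorem min?_getD_cons (x : Int) (t : List Int) :
    (PySem.List.min? (x :: t) (fun y => y)).getD 0 = t.foldl min x := by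
  rw [PySem.List.min?_id_cons]; rfl

-- ===== VERDICT (by name: the statement is the Claim_ definition above) =====
theorem min_scores_spec : Claim_equal_min_scores := by
  intro scores _ hpre
  obtain ⟨hne, hrows⟩ := hpre
  obtain ⟨r0, rest, rfl⟩ := List.exists_cons_of_ne_nil hne
  have hlen : ∀ r ∈ rest, r0.length ≤ r.length := fun r hr => by
    exact (hrows r (by simp [hr])).2
  have h0 : PySem.List.pyGet? (r0 :: rest) 0 = some r0 := by
    have h := PySem.List.pyGet?_natCast (r0 :: rest) 0
    simpa using h
  have hz : List.zipWith min r0 r0 = r0 := by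
    apply List.ext_getElem <;> simp
  have hsucc :
      (PySem.List.pyRange 0 ((r0.length : Int)) 1).foldl
        (fun acc j => acc ++ [(PySem.List.min?
            ((PySem.List.pyRange 0 (((r0 :: rest).length : Int)) 1).map
              (fun i => PySem.List.pyGetD (PySem.List.pyGetD (r0 :: rest) i []) j 0))
            (fun x => x)).getD 0]) []
      = (r0 :: rest).foldl (fun c r => List.zipWith min c r) r0 := by
    rw [List.foldl_cons, hz, foldl_zipWith_min rest r0 hlen]
    rw [foldl_append_singleton, List.nil_append]
    have houter : PySem.List.pyRange 0 ((r0.length : Int)) 1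
        = List.map (fun (k : Nat) => (k : Int)) (List.range r0.length) := by
      rw [PySem.List.pyRange_zero_natCast]
    rw [houter, List.map_map]
    apply List.map_congr_left
    intro k hk
    have hcol : (PySem.List.pyRange 0 (((r0 :: rest).length : Int)) 1).map
        (fun i => PySem.List.pyGetD (PySem.List.pyGetD (r0 :: rest) i []) (k : Int) 0)
        = (r0 :: rest).map (fun r => r.getD k 0) := by
      calc (PySem.List.pyRange 0 (((r0 :: rest).length : Int)) 1).map
            (fun i => PySem.List.pyGetD (PySem.List.pyGetD (r0 :: rest) i []) (k : Int) 0)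
          = ((PySem.List.pyRange 0 (((r0 :: rest).length : Int)) 1).map
              (fun i => PySem.List.pyGetD (r0 :: rest) i [])).map
              (fun r => PySem.List.pyGetD r (k : Int) 0) := by
            simp only [List.map_map, Function.comp_def]
        _ = (r0 :: rest).map (fun r => PySem.List.pyGetD r (k : Int) 0) := by
              rw [PySem.List.map_pyGetD_pyRange_zero']
        _ = (r0 :: rest).map (fun r => r.getD k 0) := by
              apply List.map_congr_left
              intro r _
              rw [PySem.List.pyGetD_natCast]
    show (PySem.List.min? ((PySem.List.pyRange 0 (((r0 :: rest).length : Int)) 1).map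
        (fun i => PySem.List.pyGetD (PySem.List.pyGetD (r0 :: rest) i []) (k : Int) 0))
        (fun x => x)).getD 0 = _
    rw [hcol, List.map_cons, min?_getD_cons]
  unfold Spec_min_scores min_scores min_scores_alt
  simp only [h0, Option.getD_some, foldl_pair_split, hsucc, foldl_append_singleton,
    List.nil_append]
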